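-- pv_equiv track=rewrite | github.com/darkfan-cheese/Chinese-chess-robot | xiaqi.py | inver_list_to_fen
-- ===== SOURCE A (Python) =====
-- def inver_list_to_fen(ax_i_new):
--     stri = ''
--     count = 0
--     inti = 0
--     count_i =[]
--     for i in ax_i_new:
--         count += 1
--         inti+=1
--         if i.isdigit():
--             count_i.append(i)
--         else:
--             count_i.append(i)
--             if count_i[inti-2].isdigit():
--                 stri +=str(count-1)
--                 stri +=i
--             else:
--                 stri +=i
--             count = 0
--     stri +=str(count)
--     return stri
-- ===== SOURCE B (Python) =====
-- def inver_list_to_fen(ax_i_new):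
--     # Stage 1: positions and values of the non-digit characters.
--     nd = [(i, ch) for i, ch in enumerate(ax_i_new) if not ch.isdigit()]
--     # Stage 2: the gap between consecutive non-digit positions is the digit count.
--     out = []
--     prev = -1
--     for i, ch in nd:
--         gap = i - prev - 1
--         if gap > 0:
--             out.append(str(gap))
--         out.append(ch)
--         prev = i
--     out.append(str(len(ax_i_new) - prev - 1))
--     return ''.join(out)
-- ===== Notes on version B (the rewrite author's own statement) =====
-- stated objective: alternative
-- what changed: A's single pass with run-length state (count/inti plus an auxiliary char list read back by index) is replaced by two stages: first collect the (index, char) pairs of the non-digit characters, then emit output purely from the gaps between consecutive non-digit positions -- no digit counter and no isdigit test in the emitting loop.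
import Mathlib
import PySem

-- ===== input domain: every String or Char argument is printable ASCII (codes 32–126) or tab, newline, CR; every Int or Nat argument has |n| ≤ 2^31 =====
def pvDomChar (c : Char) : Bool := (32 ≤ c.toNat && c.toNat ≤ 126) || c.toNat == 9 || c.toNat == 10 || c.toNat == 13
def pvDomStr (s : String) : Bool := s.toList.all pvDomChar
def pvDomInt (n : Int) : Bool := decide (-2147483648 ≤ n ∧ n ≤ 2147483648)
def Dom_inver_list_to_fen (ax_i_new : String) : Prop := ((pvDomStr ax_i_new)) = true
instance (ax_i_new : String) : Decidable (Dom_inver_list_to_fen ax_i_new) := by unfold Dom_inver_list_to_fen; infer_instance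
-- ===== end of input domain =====

-- B replaces A's one-pass run-length machinery (count/inti and an auxiliary char list read
-- back by index) with two stages: collect the (index, char) pairs of the non-digit characters,
-- then emit from the gaps between consecutive non-digit positions; objective: alternative.

-- ===== PORT A =====
-- A's loop state: stri, count, inti, count_i (the chars seen so far); on a non-digit it
-- looks back at count_i[inti-2] (index -1 = the current char itself when inti = 1; this
-- index is always in range, so the `none` arm of pyGet? is unreachable).
def pvALoop : List Char → List Char → Int → Int → List Char → List Char
  | [], stri, count, _, _ => stri ++ PySem.Int.toChars count
  | i :: rest, stri, count, inti, count_i =>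
      let count' := count + 1
      let inti' := inti + 1
      let count_i' := count_i ++ [i]
      if PySem.Chars.isdigit i then
        pvALoop rest stri count' inti' count_i'
      else
        let prevDigit := ((PySem.List.pyGet? count_i' (inti' - 2)).map PySem.Chars.isdigit).getD false
        let stri' := if prevDigit then stri ++ PySem.Int.toChars (count' - 1) ++ [i]
                     else stri ++ [i]
        pvALoop rest stri' 0 inti' count_i'

def inver_list_to_fen (ax_i_new : String) : String :=
  String.ofList (pvALoop ax_i_new.toList [] 0 0 [])

-- ===== PORT B =====
-- loop `for i, ch in nd:` over (out, prev)
def pvBLoop2 : List (Int × Char) → List (List Char) → Int → List (List Char) × Int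
  | [], out, prev => (out, prev)
  | (i, ch) :: rest, out, prev =>
      pvBLoop2 rest
        ((if i - prev - 1 > 0 then out ++ [PySem.Int.toChars (i - prev - 1)] else out) ++ [[ch]]) i

def inver_list_to_fen_alt (ax_i_new : String) : String :=
  let s := ax_i_new.toList
  let nd := (PySem.List.enumerate s).filter (fun p => !PySem.Chars.isdigit p.2)
  let r := pvBLoop2 nd [] (-1)
  String.ofList (PySem.Chars.join [] (r.1 ++ [PySem.Int.toChars ((s.length : Int) - r.2 - 1)]))

-- ===== PRECONDITION & SPEC =====
def Spec_inver_list_to_fen (ax_i_new : String) (out : String) : Prop := out = inver_list_to_fen_alt ax_i_new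
instance (ax_i_new : String) (out : String) : Decidable (Spec_inver_list_to_fen ax_i_new out) := by unfold Spec_inver_list_to_fen; infer_instance

-- ===== CLAIM (what is proved, stated in full; the proofs are below) =====
def Claim_equal_inver_list_to_fen : Prop := ∀ (ax_i_new : String), Dom_inver_list_to_fen ax_i_new → Spec_inver_list_to_fen ax_i_new (inver_list_to_fen ax_i_new)

-- ===== LEMMAS AND PROOFS =====

-- proof-side intermediate: a run-length loop (single digit counter), used as a bridge
def pvOldLoop : List Char → List (List Char) → Int → List Char
  | [], parts, empty => PySem.Chars.join [] (parts ++ [PySem.Int.toChars empty])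
  | ch :: rest, parts, empty =>
      if PySem.Chars.isdigit ch then pvOldLoop rest parts (empty + 1)
      else pvOldLoop rest
        ((if empty ≠ 0 then parts ++ [PySem.Int.toChars empty] else parts) ++ [[ch]]) 0

theorem pvJoin0 (l : List (List Char)) : PySem.Chars.join [] l = l.flatten := by
  simp [PySem.Chars.join, List.intercalate]
  induction l with
  | nil => rfl
  | cons a t ih =>
      cases t with
      | nil => simp
      | cons b u => simpa [List.intersperse] using ih

theorem pvJoin0_append (l : List (List Char)) (x : List Char) :
    PySem.Chars.join [] (l ++ [x]) = PySem.Chars.join [] l ++ x := by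
  simp [pvJoin0]

theorem pvGetBack (l : List Char) (i : Char) :
    PySem.List.pyGet? (l ++ [i]) ((l.length : Int) + 1 - 2)
      = if l = [] then some i else l.getLast? := by
  cases l with
  | nil => simpa using PySem.List.pyGet?_neg_one_append_singleton [] i
  | cons c t =>
      have hlen : ((c :: t).length : Int) + 1 - 2 = (((c :: t).length - 1 : Nat) : Int) := by
        simp; omega
      rw [hlen, PySem.List.pyGet?_natCast,
          List.getElem?_append_left (by simp : (c :: t).length - 1 < (c :: t).length),
          ← List.getLast?_eq_getElem?]
      simp

-- the last element of count_i is a digit exactly when the current digit run is nonempty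
theorem pvLoop_eq (rest : List Char) :
    ∀ (parts : List (List Char)) (empty : Int) (count_i : List Char),
      0 ≤ empty →
      ((0 < empty) ↔ ((count_i.getLast?.map PySem.Chars.isdigit).getD false = true)) →
      pvALoop rest (PySem.Chars.join [] parts) empty (count_i.length : Int) count_i
        = pvOldLoop rest parts empty := by
  induction rest with
  | nil =>
      intro parts empty count_i _ _
      simp [pvALoop, pvOldLoop, pvJoin0_append]
  | cons i rest ih =>
      intro parts empty count_i hnn hlast
      by_cases hd : PySem.Chars.isdigit i
      · have h1 : ((count_i ++ [i]).length : Int) = (count_i.length : Int) + 1 := by simp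
        simp only [pvALoop, pvOldLoop, hd, reduceIte]
        rw [← h1]
        refine ih parts (empty + 1) (count_i ++ [i]) (by omega) ?_
        rw [List.getLast?_concat]
        simp [hd]
        omega
      · have hprev : ((PySem.List.pyGet? (count_i ++ [i]) ((count_i.length : Int) + 1 - 2)).map
            PySem.Chars.isdigit).getD false = decide (empty ≠ 0) := by
          rw [pvGetBack]
          cases hc : count_i with
          | nil =>
              have h0 : empty = 0 := by
                have : ¬ (0 < empty) := by rw [hlast]; subst hc; simp
                omega
              simp [hd, h0]
          | cons c t =>
              obtain ⟨x, hx⟩ : ∃ x, (c :: t).getLast? = some x :=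
                ⟨(c :: t).getLast (by simp), List.getLast?_eq_some_getLast (by simp)⟩
              rw [hc] at hlast
              rw [if_neg (by simp : ¬ (c :: t) = []), hx]
              rw [hx] at hlast
              simp only [Option.map_some, Option.getD_some] at hlast ⊢
              cases hdx : PySem.Chars.isdigit x with
              | true =>
                  have : 0 < empty := hlast.mpr (by rw [hdx])
                  simp [show empty ≠ 0 by omega]
              | false =>
                  have : ¬ 0 < empty := by rw [hlast, hdx]; simp
                  simp [show empty = 0 by omega]
        simp only [pvALoop, pvOldLoop, hd, reduceIte, Bool.false_eq_true, hprev]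
        have hinv : ((0:Int) < 0) ↔
            (((count_i ++ [i]).getLast?.map PySem.Chars.isdigit).getD false = true) := by
          rw [List.getLast?_concat]; simp [hd]
        have h1 : ((count_i ++ [i]).length : Int) = (count_i.length : Int) + 1 := by simp
        by_cases he : empty ≠ 0
        · rw [if_pos (show decide (empty ≠ 0) = true by simpa using he), if_pos he,
              add_sub_cancel_right]
          rw [show PySem.Chars.join [] parts ++ PySem.Int.toChars empty ++ [i]
                = PySem.Chars.join [] ((parts ++ [PySem.Int.toChars empty]) ++ [[i]]) by
              rw [pvJoin0_append, pvJoin0_append]]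
          rw [← h1]
          exact ih ((parts ++ [PySem.Int.toChars empty]) ++ [[i]]) 0 (count_i ++ [i]) le_rfl hinv
        · rw [if_neg (show ¬ decide (empty ≠ 0) = true by simpa using he), if_neg he]
          rw [show PySem.Chars.join [] parts ++ [i]
                = PySem.Chars.join [] (parts ++ [[i]]) by rw [pvJoin0_append]]
          rw [← h1]
          exact ih (parts ++ [[i]]) 0 (count_i ++ [i]) le_rfl hinv

-- the run-length loop equals B's gap-arithmetic over the non-digit (index, char) pairs
theorem pvGap_eq (t : List Char) :
    ∀ (k prev : Int) (parts : List (List Char)),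
      prev ≤ k - 1 →
      pvOldLoop t parts (k - prev - 1)
        = (let r := pvBLoop2
              ((PySem.List.enumerate t k).filter (fun p => !PySem.Chars.isdigit p.2)) parts prev
           PySem.Chars.join [] (r.1 ++ [PySem.Int.toChars (k + (t.length : Int) - r.2 - 1)])) := by
  induction t with
  | nil =>
      intro k prev parts _
      simp [pvOldLoop, PySem.List.enumerate_nil, pvBLoop2]
  | cons c t ih =>
      intro k prev parts hle
      have hlen : k + ((c :: t).length : Int) = (k + 1) + (t.length : Int) := by
        simp [List.length_cons]; ring
      rw [PySem.List.enumerate_cons]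
      by_cases hd : PySem.Chars.isdigit c
      · simp only [pvOldLoop, hd, reduceIte, List.filter_cons]
        have : k - prev - 1 + 1 = (k + 1) - prev - 1 := by ring
        rw [this, hlen]
        exact ih (k + 1) prev parts (by omega)
      · simp only [pvOldLoop, hd, reduceIte, List.filter_cons, Bool.not_false,
          Bool.false_eq_true]
        simp only [pvBLoop2]
        have hif : (if k - prev - 1 ≠ 0 then parts ++ [PySem.Int.toChars (k - prev - 1)]
              else parts)
            = (if k - prev - 1 > 0 then parts ++ [PySem.Int.toChars (k - prev - 1)]
              else parts) := by
          by_cases h : k - prev - 1 = 0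
          · rw [if_neg (by omega), if_neg (by omega)]
          · rw [if_pos h, if_pos (by omega)]
        rw [hif, hlen]
        have hIH := ih (k + 1) k
          ((if k - prev - 1 > 0 then parts ++ [PySem.Int.toChars (k - prev - 1)] else parts)
            ++ [[c]]) (by omega)
        rw [show (k + 1) - k - 1 = (0 : Int) by ring] at hIH
        exact hIH

-- ===== VERDICT (by name: the statement is the Claim_ definition above) =====
theorem inver_list_to_fen_spec : Claim_equal_inver_list_to_fen := by
  intro s _
  unfold Spec_inver_list_to_fen inver_list_to_fen inver_list_to_fen_alt
  refine congrArg String.ofList ?_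
  have h1 := pvLoop_eq s.toList [] 0 [] (by omega) (by simp)
  have h2 := pvGap_eq s.toList 0 (-1) [] (by omega)
  simp only [zero_add] at h2
  simpa [PySem.Chars.join, List.intercalate] using h1.trans h2
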